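-- pv_equiv track=rewrite | github.com/beebek/markdown | script.py | block_separator
-- ===== SOURCE A (Python) =====
-- NEW_BLOCK = "* "
--
-- def block_separator(content=None):
--     blocks = []
--     block_items = []
--     same_block = False
--     for line in content.splitlines():
--         if not line:
--             continue
--         if line.startswith(NEW_BLOCK):
--             blocks.append(block_items)
--             block_items = []
--         block_items.append(line)
--     blocks.append(block_items)
--     blocks.pop(0)
--     return blocks
-- ===== SOURCE B (Python) =====
-- NEW_BLOCK = "* "
--
-- def block_separator(content=None):
--     # Recursive take-a-block-at-a-time decomposition instead of A's
--     # flush-accumulator single pass with a final pop(0).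
--     lines = [l for l in content.splitlines() if l]
--
--     def group(ls):
--         # ls is empty or starts with a bullet line: first block is ls[:i]
--         # where i is the first bullet position after 0 (or len(ls)).
--         if not ls:
--             return []
--         i = 1
--         while i < len(ls) and not ls[i].startswith(NEW_BLOCK):
--             i += 1
--         return [ls[:i]] + group(ls[i:])
--
--     # discard everything before the first bullet line
--     k = 0
--     while k < len(lines) and not lines[k].startswith(NEW_BLOCK):
--         k += 1
--     return group(lines[k:])
-- ===== Notes on version B (the rewrite author's own statement) =====
-- stated objective: alternative
-- what changed: Replaces A's single-pass flush-accumulator loop (append current block on each bullet, then pop the leading pre-bullet block) with a recursive decomposition: filter empty lines, drop the pre-bullet prefix, then repeatedly cut off one block (bullet line plus following non-bullet lines) at a time.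
-- outside the precondition, e.g. on block_separator(None): A raises AttributeError, B raises AttributeError
import Mathlib
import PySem

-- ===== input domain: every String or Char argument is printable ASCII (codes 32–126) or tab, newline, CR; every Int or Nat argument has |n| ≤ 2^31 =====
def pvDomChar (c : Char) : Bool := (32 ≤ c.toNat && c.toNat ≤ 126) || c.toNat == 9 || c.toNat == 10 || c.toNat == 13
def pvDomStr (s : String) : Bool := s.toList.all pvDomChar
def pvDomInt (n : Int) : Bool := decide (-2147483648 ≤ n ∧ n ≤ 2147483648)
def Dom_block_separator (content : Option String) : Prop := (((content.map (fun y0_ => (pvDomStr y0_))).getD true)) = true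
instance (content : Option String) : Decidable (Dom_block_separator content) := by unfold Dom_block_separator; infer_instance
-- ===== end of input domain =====

-- B replaces A's flush-accumulator loop + pop(0) with a recursive cut-one-block-at-a-time
-- decomposition (same output, same cost; objective: alternative structure).

-- ===== PORT A =====
-- loop body of A: skip empty lines, flush the current block on a bullet line, append the line
def pvStepA (st : List (List String) × List String) (line : String) :
    List (List String) × List String :=
  if line == "" then st
  else if PySem.Str.startswith line "* " then (st.1 ++ [st.2], [line])
  else (st.1, st.2 ++ [line])

def block_separator (content : Option String) : List (List String) :=
  match content with
  | none => []   -- Python raises AttributeError on None; excluded by Pre_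
  | some s =>
    let st := (PySem.Str.splitlines s).foldl pvStepA ([], [])
    let blocks := st.1 ++ [st.2]     -- final blocks.append(block_items)
    blocks.tail                      -- blocks.pop(0): the list is nonempty, the popped value is discarded

-- ===== PORT B =====
-- group: first block is ls[:i] with i the first bullet position after 0 (the hand-written
-- index scan is exactly takeWhile/dropWhile of the non-bullet predicate on ls[1:])
def pvGroupB : List String → List (List String)
  | [] => []
  | l :: rest =>
      (l :: rest.takeWhile (fun x => !PySem.Str.startswith x "* ")) ::
        pvGroupB (rest.dropWhile (fun x => !PySem.Str.startswith x "* "))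
  termination_by ls => ls.length
  decreasing_by simp; exact List.length_dropWhile_le _ _

def block_separator_alt (content : Option String) : List (List String) :=
  match content with
  | none => []   -- Python raises AttributeError on None; excluded by Pre_
  | some s =>
    let lines := (PySem.Str.splitlines s).filter (fun l => l != "")
    -- k-loop: drop everything before the first bullet line
    pvGroupB (lines.dropWhile (fun x => !PySem.Str.startswith x "* "))

-- ===== PRECONDITION & SPEC =====
-- Pre_ excludes only content = None, on which the Python A raises AttributeError.
def Pre_block_separator (content : Option String) : Prop := content.isSome = true
instance (content : Option String) : Decidable (Pre_block_separator content) := by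
  unfold Pre_block_separator; infer_instance

def pvWitness_block_separator : Option String := some "* a\nb\n* c"

def Spec_block_separator (content : Option String) (out : List (List String)) : Prop := out = block_separator_alt content
instance (content : Option String) (out : List (List String)) : Decidable (Spec_block_separator content out) := by unfold Spec_block_separator; infer_instance

-- ===== CLAIM (what is proved, stated in full; the proofs are below) =====
def Claim_equal_block_separator : Prop := ∀ (content : Option String), Dom_block_separator content → Pre_block_separator content → Spec_block_separator content (block_separator content)

-- ===== LEMMAS AND PROOFS =====

theorem pvGroupB_nil : pvGroupB [] = [] := by rw [pvGroupB]

theorem pvGroupB_cons (l : String) (rest : List String) :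
    pvGroupB (l :: rest)
      = (l :: rest.takeWhile (fun x => !PySem.Str.startswith x "* ")) ::
          pvGroupB (rest.dropWhile (fun x => !PySem.Str.startswith x "* ")) := by
  rw [pvGroupB]

-- invariant of A's loop over the already-filtered lines
theorem pvFoldA_eq (ls : List String) : ∀ (bs : List (List String)) (cur : List String),
    (ls.foldl (fun st l =>
        if PySem.Str.startswith l "* " then (st.1 ++ [st.2], [l]) else (st.1, st.2 ++ [l]))
      (bs, cur)).1
      ++ [(ls.foldl (fun st l =>
        if PySem.Str.startswith l "* " then (st.1 ++ [st.2], [l]) else (st.1, st.2 ++ [l]))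
      (bs, cur)).2]
    = bs ++ [cur ++ ls.takeWhile (fun x => !PySem.Str.startswith x "* ")]
        ++ pvGroupB (ls.dropWhile (fun x => !PySem.Str.startswith x "* ")) := by
  induction ls with
  | nil => intro bs cur; simp [pvGroupB_nil]
  | cons l rest ih =>
    intro bs cur
    cases hb : PySem.Str.startswith l "* " with
    | true =>
      have hnb : (!PySem.Str.startswith l "* ") = false := by rw [hb]; rfl
      simp only [List.foldl_cons, if_pos hb]
      rw [ih]
      simp only [List.takeWhile_cons, List.dropWhile_cons, hnb, Bool.false_eq_true, if_false,
        pvGroupB_cons]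
      simp
    | false =>
      have hnb : (!PySem.Str.startswith l "* ") = true := by rw [hb]; rfl
      simp only [List.foldl_cons, hb, Bool.false_eq_true, if_false]
      rw [ih]
      simp only [List.takeWhile_cons, List.dropWhile_cons, hnb, if_true]
      simp

theorem pvStepA_if (st : List (List String) × List String) (l : String) :
    pvStepA st l =
      if (l != "") = true then
        (if PySem.Str.startswith l "* " then (st.1 ++ [st.2], [l]) else (st.1, st.2 ++ [l]))
      else st := by
  unfold pvStepA
  by_cases h : l = "" <;> simp [h]

-- ===== VERDICT (by name: the statement is the Claim_ definition above) =====
theorem block_separator_spec : Claim_equal_block_separator := by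
  intro content _ hpre
  match content with
  | none => simp [Pre_block_separator] at hpre
  | some s =>
    show block_separator (some s) = block_separator_alt (some s)
    unfold block_separator block_separator_alt
    have hstep : (PySem.Str.splitlines s).foldl pvStepA ([], []) =
        ((PySem.Str.splitlines s).filter (fun l => l != "")).foldl
          (fun st l => if PySem.Str.startswith l "* " then (st.1 ++ [st.2], [l]) else (st.1, st.2 ++ [l]))
          ([], []) := by
      rw [funext fun st => funext fun l => pvStepA_if st l]
      exact PySem.List.foldl_if_eq_foldl_filter _ _ _ _
    simp only [hstep, pvFoldA_eq]
    simp
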